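-- pv_equiv track=rewrite | github.com/isaaclb98/rhizome | rhizome/corpus/chunker.py | _truncate_before_bibliography
-- ===== SOURCE A (Python) =====
-- _STOP_HEADERS = [
--     "See also",
--     "References",
--     "Further reading",
--     "External links",
--     "Notes",
--     "Bibliography",
--     "Explanatory footnotes",
--     "General and cited references",
-- ]
--
-- def _truncate_before_bibliography(text: str) -> str:
--     """Truncate text at the first bibliography section header.
--
--     Wikipedia articles contain References, See also, External links and other
--     sections after the main prose. These sections add noise to embeddings.
--     This function finds the earliest bibliography header and cuts there.
--
--     Handles both plain text headers (e.g. "\nExternal links\n") and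
--     Wikipedia markup headers (e.g. "\n== External links ==\n").
--     """
--     earliest = len(text)
--     for header in _STOP_HEADERS:
--         # Plain text with trailing newline (paragraph separator after header)
--         plain = f"\n{header}\n"
--         # Wikipedia markup: == Header == (with optional trailing spaces inside markup)
--         markup = f"\n== {header} =="
--         for variant in [plain, markup]:
--             pos = text.find(variant)
--             if pos != -1 and pos < earliest:
--                 earliest = pos
--     return text[:earliest]
-- ===== SOURCE B (Python) =====
-- _STOP_HEADERS = [
--     "See also",
--     "References",
--     "Further reading",
--     "External links",
--     "Notes",
--     "Bibliography",
--     "Explanatory footnotes",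
--     "General and cited references",
-- ]
--
-- # Both forms for every header, built once at import time.
-- _VARIANTS = tuple(
--     v for h in _STOP_HEADERS for v in (f"\n{h}\n", f"\n== {h} ==")
-- )
--
--
-- def _truncate_before_bibliography(text: str) -> str:
--     """Single left-to-right scan: cut at the first position where any
--     stop-header variant starts, instead of running a separate find pass
--     per variant and keeping a running minimum."""
--     for i in range(len(text)):
--         if text.startswith(_VARIANTS, i):
--             return text[:i]
--     return text
-- ===== Notes on version B (the rewrite author's own statement) =====
-- stated objective: alternative
-- what changed: Replaces 16 independent full-text str.find passes plus a running minimum with a single left-to-right scan that stops (early return) at the first position where any stop-header variant starts, using one tuple-startswith test per position.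
import Mathlib
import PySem

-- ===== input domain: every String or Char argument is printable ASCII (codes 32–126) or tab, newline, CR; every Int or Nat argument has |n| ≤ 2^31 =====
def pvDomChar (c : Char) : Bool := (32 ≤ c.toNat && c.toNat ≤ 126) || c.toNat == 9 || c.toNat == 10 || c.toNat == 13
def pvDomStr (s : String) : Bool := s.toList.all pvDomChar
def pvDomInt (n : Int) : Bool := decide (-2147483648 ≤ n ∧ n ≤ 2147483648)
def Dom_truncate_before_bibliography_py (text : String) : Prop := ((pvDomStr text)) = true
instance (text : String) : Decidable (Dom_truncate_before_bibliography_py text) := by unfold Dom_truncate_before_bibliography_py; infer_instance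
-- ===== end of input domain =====

-- B replaces A's 16 independent find passes + running minimum by one left-to-right scan
-- that returns at the first position where any stop-header variant starts (objective: alternative).

-- ===== PORT A =====
def pvStopHeaders : List (List Char) :=
  ["See also".toList, "References".toList, "Further reading".toList,
   "External links".toList, "Notes".toList, "Bibliography".toList,
   "Explanatory footnotes".toList, "General and cited references".toList]

-- body of 'for variant in [plain, markup]: pos = text.find(variant); if pos != -1 and pos < earliest: earliest = pos'
def pvStepA (cs : List Char) (earliest : Int) (variant : List Char) : Int :=
  let pos := PySem.Chars.find cs variant
  if pos ≠ -1 ∧ pos < earliest then pos else earliest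

-- the double loop of A: earliest = len(text); for header in _STOP_HEADERS: for variant in [plain, markup]: …
def pvEarliest (cs : List Char) : Int :=
  pvStopHeaders.foldl (fun e header =>
    let plain := '\n' :: (header ++ ['\n'])
    let markup := "\n== ".toList ++ header ++ " ==".toList
    [plain, markup].foldl (pvStepA cs) e) (PySem.Chars.len cs)

def truncate_before_bibliography_py (text : String) : String :=
  let cs := text.toList
  let earliest := pvEarliest cs
  String.ofList (PySem.Chars.slice cs none (some earliest))   -- text[:earliest]

-- ===== PORT B =====
-- _VARIANTS = tuple(v for h in _STOP_HEADERS for v in (f"\n{h}\n", f"\n== {h} =="))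
def pvVariants : List (List Char) :=
  pvStopHeaders.flatMap (fun h =>
    ['\n' :: (h ++ ['\n']), "\n== ".toList ++ h ++ " ==".toList])

-- 'for i in range(len(text)): if text.startswith(_VARIANTS, i): return text[:i]'
-- text.startswith(tup, i) with 0 ≤ i ≤ len is 'some member of tup is a prefix of text[i:]' — exact here.
def pvScanB (cs : List Char) (i : Nat) : List Char :=
  if i < cs.length then
    if pvVariants.any (fun v => PySem.Chars.startswith (List.drop i cs) v) then cs.take i
    else pvScanB cs (i + 1)
  else cs
termination_by cs.length - i

def truncate_before_bibliography_py_alt (text : String) : String :=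
  String.ofList (pvScanB text.toList 0)

-- ===== PRECONDITION & SPEC =====
def Spec_truncate_before_bibliography_py (text : String) (out : String) : Prop := out = truncate_before_bibliography_py_alt text
instance (text : String) (out : String) : Decidable (Spec_truncate_before_bibliography_py text out) := by unfold Spec_truncate_before_bibliography_py; infer_instance

-- ===== CLAIM (what is proved, stated in full; the proofs are below) =====
def Claim_equal_truncate_before_bibliography_py : Prop := ∀ (text : String), Dom_truncate_before_bibliography_py text → Spec_truncate_before_bibliography_py text (truncate_before_bibliography_py text)

-- ===== LEMMAS AND PROOFS =====

-- 'some variant starts at position i'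
def pvHit (cs : List Char) (i : Nat) : Prop := ∃ v ∈ pvVariants, v <+: List.drop i cs

lemma pvFold_flat (cs : List Char) :
    pvEarliest cs = pvVariants.foldl (pvStepA cs) (PySem.Chars.len cs) := by
  unfold pvEarliest pvVariants
  generalize pvStopHeaders = hs
  generalize (PySem.Chars.len cs) = init
  induction hs generalizing init with
  | nil => rfl
  | cons h t ih =>
    simp only [List.flatMap_cons, List.foldl_append, List.foldl_cons, List.foldl_nil]
    exact ih _

lemma pvFold_le (cs : List Char) (l : List (List Char)) :
    ∀ init : Int, l.foldl (pvStepA cs) init ≤ init := by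
  induction l with
  | nil => intro init; exact le_refl _
  | cons v t ih =>
    intro init
    refine le_trans (ih _) ?_
    simp only [pvStepA]
    split_ifs with h
    · exact le_of_lt h.2
    · exact le_refl _

lemma pvFold_le_find (cs : List Char) (l : List (List Char)) :
    ∀ init : Int, ∀ v ∈ l, PySem.Chars.find cs v ≠ -1 →
      l.foldl (pvStepA cs) init ≤ PySem.Chars.find cs v := by
  induction l with
  | nil => intro _ v hv; cases hv
  | cons u t ih =>
    intro init v hv hne
    rcases List.mem_cons.mp hv with rfl | hv
    · refine le_trans (pvFold_le cs t _) ?_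
      simp only [pvStepA]
      split_ifs with h
      · exact le_refl _
      · push Not at h
        exact h hne
    · exact ih _ v hv hne

lemma pvFold_cases (cs : List Char) (l : List (List Char)) :
    ∀ init : Int, l.foldl (pvStepA cs) init = init ∨
      ∃ v ∈ l, PySem.Chars.find cs v ≠ -1 ∧
        l.foldl (pvStepA cs) init = PySem.Chars.find cs v := by
  induction l with
  | nil => intro init; exact Or.inl rfl
  | cons u t ih =>
    intro init
    rcases ih (pvStepA cs init u) with h | ⟨v, hv, hne, he⟩
    · simp only [List.foldl_cons, h]
      simp only [pvStepA]
      split_ifs with hc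
      · exact Or.inr ⟨u, List.mem_cons_self, hc.1, rfl⟩
      · exact Or.inl rfl
    · exact Or.inr ⟨v, List.mem_cons_of_mem _ hv, hne, he⟩

-- a hit at j means some variant's (first) find position is ≤ j and ≠ -1
lemma pvHit_find (cs : List Char) (j : Nat) (h : pvHit cs j) :
    ∃ v ∈ pvVariants, PySem.Chars.find cs v ≠ -1 ∧ (PySem.Chars.find cs v).toNat ≤ j := by
  obtain ⟨v, hv, hp⟩ := h
  have hin : PySem.Chars.isIn v cs = true :=
    (PySem.Chars.exists_prefix_drop_iff_isIn v cs).mp ⟨j, hp⟩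
  have hinf : v <:+: cs := (PySem.Chars.isIn_iff_infix v cs).mp hin
  have hne : PySem.Chars.find cs v ≠ -1 := (PySem.Chars.find_ne_neg_one_iff cs v).mpr hinf
  have h0 : 0 ≤ PySem.Chars.find cs v := by
    have := PySem.Chars.neg_one_le_find (s := cs) (sub := v); omega
  refine ⟨v, hv, hne, ?_⟩
  by_contra hlt
  exact ((PySem.Chars.find_spec (s := cs) (sub := v) h0).2 j (by omega)) hp

lemma pvEarliest_nonneg (cs : List Char) : 0 ≤ pvEarliest cs := by
  rw [pvFold_flat]
  rcases pvFold_cases cs pvVariants (PySem.Chars.len cs) with h | ⟨v, _, hne, he⟩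
  · rw [h, PySem.Chars.len_eq]; exact_mod_cast Nat.zero_le _
  · rw [he]
    have := PySem.Chars.neg_one_le_find (s := cs) (sub := v); omega

lemma pvEarliest_le_len (cs : List Char) : pvEarliest cs ≤ cs.length := by
  rw [pvFold_flat]
  have := pvFold_le cs pvVariants (PySem.Chars.len cs)
  rwa [PySem.Chars.len_eq] at this

lemma pvEarliest_le_of_hit (cs : List Char) (j : Nat) (h : pvHit cs j) :
    (pvEarliest cs).toNat ≤ j := by
  obtain ⟨v, hv, hne, hle⟩ := pvHit_find cs j h
  have h1 : pvEarliest cs ≤ PySem.Chars.find cs v := by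
    rw [pvFold_flat]; exact pvFold_le_find cs pvVariants _ v hv hne
  have h0 := pvEarliest_nonneg cs
  omega

lemma pvEarliest_hit (cs : List Char) (h : (pvEarliest cs).toNat < cs.length) :
    pvHit cs (pvEarliest cs).toNat := by
  rcases (pvFold_flat cs ▸ pvFold_cases cs pvVariants (PySem.Chars.len cs)) with he | ⟨v, hv, hne, he⟩
  · rw [he, PySem.Chars.len_eq] at h; simp at h
  · have h0 : 0 ≤ PySem.Chars.find cs v := by
      have := PySem.Chars.neg_one_le_find (s := cs) (sub := v); omega
    exact ⟨v, hv, he ▸ (PySem.Chars.find_spec (s := cs) (sub := v) h0).1⟩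

lemma pvAny_iff_hit (cs : List Char) (i : Nat) :
    pvVariants.any (fun v => PySem.Chars.startswith (List.drop i cs) v) = true ↔ pvHit cs i := by
  rw [List.any_eq_true]
  constructor
  · rintro ⟨v, hv, hs⟩; exact ⟨v, hv, (PySem.Chars.startswith_iff _ v).mp hs⟩
  · rintro ⟨v, hv, hp⟩; exact ⟨v, hv, (PySem.Chars.startswith_iff _ v).mpr hp⟩

lemma pvScanB_eq (cs : List Char) :
    ∀ k i, cs.length - i ≤ k → i ≤ (pvEarliest cs).toNat →
      pvScanB cs i = cs.take (pvEarliest cs).toNat := by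
  intro k
  induction k with
  | zero =>
    intro i hk hi
    have hlen : cs.length ≤ i := by omega
    have := pvEarliest_le_len cs
    have hieq : i = (pvEarliest cs).toNat := by omega
    rw [pvScanB]
    simp only [if_neg (by omega : ¬ i < cs.length)]
    rw [List.take_of_length_le (by omega)]
  | succ k ih =>
    intro i hk hi
    by_cases hlt : i < cs.length
    · rw [pvScanB]
      simp only [if_pos hlt]
      by_cases hhit : pvVariants.any (fun v => PySem.Chars.startswith (List.drop i cs) v) = true
      · have := pvEarliest_le_of_hit cs i ((pvAny_iff_hit cs i).mp hhit)
        have hieq : i = (pvEarliest cs).toNat := by omega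
        rw [if_pos hhit, hieq]
      · rw [if_neg hhit]
        have hne : i ≠ (pvEarliest cs).toNat := by
          intro he
          exact hhit ((pvAny_iff_hit cs i).mpr (he ▸ pvEarliest_hit cs (he ▸ hlt)))
        exact ih (i + 1) (by omega) (by omega)
    · rw [pvScanB]
      simp only [if_neg hlt]
      have := pvEarliest_le_len cs
      have : i = (pvEarliest cs).toNat := by omega
      rw [List.take_of_length_le (by omega)]

-- ===== VERDICT (by name: the statement is the Claim_ definition above) =====
theorem truncate_before_bibliography_py_spec : Claim_equal_truncate_before_bibliography_py := by
  intro text _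
  unfold Spec_truncate_before_bibliography_py truncate_before_bibliography_py truncate_before_bibliography_py_alt
  simp only [PySem.Chars.slice_eq_listSlice]
  rw [PySem.List.slice_to _ (pvEarliest_nonneg text.toList),
      pvScanB_eq text.toList text.toList.length 0 (by omega) (by
        have := pvEarliest_le_len text.toList
        have := pvEarliest_nonneg text.toList
        omega)]
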